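-- pv_equiv track=rewrite | github.com/YuYeongChan/Coding-Test | programmers/Level0/qr code/solution.py | solution
-- ===== SOURCE A (Python) =====
-- def solution(q, r, code):
--     answer = ''
--     y = []
--     for i in range(0, len(code), q):
--         x = []
--         for j in range(i, min(i + q, len(code))):
--             x.append(code[j])
--         y.append(x)
--     for i in range(len(y)):
--         if r < len(y[i]):
--             answer += y[i][r]
--     return answer
-- ===== SOURCE B (Python) =====
-- def solution(q, r, code):
--     if q <= r:
--         return ''
--     return ''.join(code[i] for i in range(r, len(code), q))
-- ===== Notes on version B (the rewrite author's own statement) =====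
-- stated objective: simpler
-- what changed: B drops the chunk-list construction and second scan entirely: it returns '' when the offset r is not below the stride q and otherwise does one strided pass joining code[i] for i in range(r, len(code), q).
-- outside the precondition, e.g. on solution(2, -1, 'abcde'): A returns 'bde', B returns 'ebd'
import Mathlib
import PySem

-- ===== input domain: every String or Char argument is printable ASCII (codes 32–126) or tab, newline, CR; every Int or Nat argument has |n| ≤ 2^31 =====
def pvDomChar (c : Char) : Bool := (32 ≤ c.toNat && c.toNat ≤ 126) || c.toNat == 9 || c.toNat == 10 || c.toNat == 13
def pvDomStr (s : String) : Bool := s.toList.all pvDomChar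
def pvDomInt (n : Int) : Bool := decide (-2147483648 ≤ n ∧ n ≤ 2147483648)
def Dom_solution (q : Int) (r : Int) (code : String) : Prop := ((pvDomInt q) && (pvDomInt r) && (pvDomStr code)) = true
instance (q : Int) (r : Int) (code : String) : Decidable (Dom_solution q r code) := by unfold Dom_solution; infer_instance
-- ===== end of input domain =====

-- B replaces A's chunk-list build + second scan by a single strided pass (offset r, stride q), a simpler decomposition of the same selection.


-- ===== PORT A =====
-- inner loop: x = []; for j in range(i, min(i+q, len(code))): x.append(code[j])
def chunkA (cs : List Char) (q : Int) (i : Int) : List Char :=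
  (PySem.List.pyRange i (min (i + q) (cs.length : Int)) 1).foldl
    (fun x j => x ++ [PySem.List.pyGetD cs j ' ']) []

-- outer first loop: y = []; for i in range(0, len(code), q): … y.append(x)
def yA (q : Int) (cs : List Char) : List (List Char) :=
  (PySem.List.pyRange 0 (cs.length : Int) q).foldl (fun acc i => acc ++ [chunkA cs q i]) []

-- second loop: for i in range(len(y)): if r < len(y[i]): answer += y[i][r]
def solution (q : Int) (r : Int) (code : String) : String :=
  String.ofList
    ((PySem.List.pyRange 0 ((yA q code.toList).length : Int) 1).foldl
      (fun a i =>
        if r < ((PySem.List.pyGetD (yA q code.toList) i []).length : Int) then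
          a ++ [PySem.List.pyGetD (PySem.List.pyGetD (yA q code.toList) i []) r ' ']
        else a) [])

-- ===== PORT B =====
-- if q <= r: return ''  else  ''.join(code[i] for i in range(r, len(code), q))
def solution_alt (q : Int) (r : Int) (code : String) : String :=
  if q ≤ r then "" else
    String.ofList
      ((PySem.List.pyRange r (code.toList.length : Int) q).foldl
        (fun a i => a ++ [PySem.List.pyGetD code.toList i ' ']) [])

-- ===== PRECONDITION & SPEC =====
-- Pre_ excludes q = 0, where A raises ValueError (range step zero), and r < 0 with q > 0, where A raises
-- IndexError whenever some chunk is shorter than -r and otherwise picks by Python's negative-index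
-- wraparound — a corner the task never specifies and B does not reproduce.
def Pre_solution (q : Int) (r : Int) (code : String) : Prop := q ≠ 0 ∧ (0 ≤ r ∨ q < 0)
instance (q : Int) (r : Int) (code : String) : Decidable (Pre_solution q r code) := by
  unfold Pre_solution; infer_instance
def pvWitness_solution : Int × Int × String := (3, 1, "abcdefgh")
def Spec_solution (q : Int) (r : Int) (code : String) (out : String) : Prop := out = solution_alt q r code
instance (q : Int) (r : Int) (code : String) (out : String) : Decidable (Spec_solution q r code out) := by
  unfold Spec_solution; infer_instance

-- ===== CLAIM (what is proved, stated in full; the proofs are below) =====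
def Claim_equal_solution : Prop := ∀ (q : Int) (r : Int) (code : String), Dom_solution q r code → Pre_solution q r code → Spec_solution q r code (solution q r code)

-- ===== LEMMAS AND PROOFS =====

-- pyRange with negative step over a nonnegative span is empty
theorem pyRange_neg_nil (a b : Int) {s : Int} (hs : s < 0) (hab : a ≤ b) :
    PySem.List.pyRange a b s = [] := by
  unfold PySem.List.pyRange
  simp [show ¬(s = 0) by omega, show ¬(0 < s) by omega, show ¬(b < a) by omega]

-- pyRange with positive step: cons and nil forms
theorem pyRange_pos_nil (a b : Int) {s : Int} (hs : 0 < s) (hab : b ≤ a) :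
    PySem.List.pyRange a b s = [] := by
  rw [PySem.List.pyRange_of_pos a b hs]
  simp [if_neg (not_lt.mpr hab)]

theorem pyRange_pos_cons (a b : Int) {s : Int} (hs : 0 < s) (hab : a < b) :
    PySem.List.pyRange a b s = a :: PySem.List.pyRange (a + s) b s := by
  rw [PySem.List.pyRange_of_pos a b hs, PySem.List.pyRange_of_pos (a + s) b hs]
  have hcount : (if a < b then ((b - a + s - 1) / s).toNat else 0)
      = (if a + s < b then ((b - (a + s) + s - 1) / s).toNat else 0) + 1 := by
    rw [if_pos hab]
    by_cases h2 : a + s < b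
    · rw [if_pos h2]
      have : b - a + s - 1 = (b - (a + s) + s - 1) + 1 * s := by ring
      rw [this, Int.add_mul_ediv_right _ _ (by omega : s ≠ 0)]
      have hnn : 0 ≤ b - (a + s) + s - 1 := by omega
      have : 0 ≤ (b - (a + s) + s - 1) / s := Int.ediv_nonneg hnn (by omega)
      omega
    · rw [if_neg h2]
      have h1 : (b - a + s - 1) / s = 1 := by
        have : b - a + s - 1 = (b - a - 1) + 1 * s := by ring
        rw [this, Int.add_mul_ediv_right _ _ (by omega : s ≠ 0)]
        have : (b - a - 1) / s = 0 := Int.ediv_eq_zero_of_lt (by omega) (by omega)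
        omega
      rw [h1]; rfl
  rw [hcount, List.range_succ_eq_map]
  simp only [List.map_cons, List.map_map]
  refine List.cons_eq_cons.mpr ⟨by push_cast; ring, ?_⟩
  apply List.map_congr_left
  intro k _
  simp only [Function.comp]
  push_cast
  ring

-- chunk i, unfolded to a map over its index range
theorem chunkA_eq_map (cs : List Char) (q i : Int) :
    chunkA cs q i
      = (PySem.List.pyRange i (min (i + q) (cs.length : Int)) 1).map
          (fun j => PySem.List.pyGetD cs j ' ') := by
  unfold chunkA
  rw [PySem.List.foldl_append_singleton_eq_map]
  simp

theorem chunkA_length (cs : List Char) (q i : Int) :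
    ((chunkA cs q i).length : Int) = ((min (i + q) (cs.length : Int) - i).toNat : Int) := by
  rw [chunkA_eq_map, List.length_map, PySem.List.length_pyRange_one]

-- y, unfolded to a map over the chunk starts
theorem yA_eq_map (q : Int) (cs : List Char) :
    yA q cs = (PySem.List.pyRange 0 (cs.length : Int) q).map (chunkA cs q) := by
  unfold yA
  rw [PySem.List.foldl_append_singleton_eq_map]
  simp

-- the core strided-selection invariant: scanning chunks from start a and picking offset r
-- equals the strided pass from a + r, for any fuel bounding the remaining length
theorem strided (cs : List Char) (q r : Int) (hq : 1 ≤ q) (hr0 : 0 ≤ r) (hrq : r < q) :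
    ∀ (k : Nat) (a : Int) (acc : List Char), 0 ≤ a → ((cs.length : Int) - a).toNat ≤ k →
      (PySem.List.pyRange a (cs.length : Int) q).foldl
        (fun acc i =>
          if r < ((chunkA cs q i).length : Int) then
            acc ++ [PySem.List.pyGetD (chunkA cs q i) r ' ']
          else acc) acc
      = (PySem.List.pyRange (a + r) (cs.length : Int) q).foldl
          (fun acc i => acc ++ [PySem.List.pyGetD cs i ' ']) acc := by
  intro k
  induction k with
  | zero =>
    intro a acc ha hk
    have hna : (cs.length : Int) ≤ a := by omega
    rw [pyRange_pos_nil _ _ (by omega) hna, pyRange_pos_nil _ _ (by omega) (by omega)]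
    rfl
  | succ k ih =>
    intro a acc ha hk
    by_cases hlt : a < (cs.length : Int)
    · rw [pyRange_pos_cons _ _ (by omega) hlt]
      simp only [List.foldl_cons]
      have hcond : (r < ((chunkA cs q a).length : Int)) ↔ a + r < (cs.length : Int) := by
        rw [chunkA_length]; omega
      by_cases hin : a + r < (cs.length : Int)
      · rw [if_pos (hcond.mpr hin)]
        have hget : PySem.List.pyGetD (chunkA cs q a) r ' ' = PySem.List.pyGetD cs (a + r) ' ' := by
          rw [chunkA_eq_map]
          have hr' : r = ((r.toNat : Int)) := (Int.toNat_of_nonneg hr0).symm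
          rw [hr']
          rw [PySem.List.pyGetD_map_pyRange_one (fun j => PySem.List.pyGetD cs j ' ')
                a (min (a + q) (cs.length : Int)) r.toNat ' ' (by omega)]
        rw [hget]
        rw [pyRange_pos_cons (a + r) _ (by omega) hin]
        simp only [List.foldl_cons]
        have : a + r + q = a + q + r := by ring
        rw [this]
        exact ih (a + q) _ (by omega) (by omega)
      · rw [if_neg (fun h => hin (hcond.mp h))]
        rw [ih (a + q) acc (by omega) (by omega)]
        rw [pyRange_pos_nil (a + q + r) _ (by omega) (by omega),
            pyRange_pos_nil (a + r) _ (by omega) (by omega)]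
    · rw [pyRange_pos_nil _ _ (by omega) (by omega), pyRange_pos_nil _ _ (by omega) (by omega)]
      rfl

-- when r ≥ q no chunk is long enough: A's second loop appends nothing
theorem solution_big_r (cs : List Char) (q r : Int) (hq : 1 ≤ q) (hrq : q ≤ r) :
    (PySem.List.pyRange 0 ((cs.length : Int)) q).foldl
      (fun acc i =>
        if r < ((chunkA cs q i).length : Int) then
          acc ++ [PySem.List.pyGetD (chunkA cs q i) r ' ']
        else acc) ([] : List Char) = [] := by
  have h := PySem.List.foldl_congr_mem
    (f := fun (acc : List Char) i =>
      if r < ((chunkA cs q i).length : Int) then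
        acc ++ [PySem.List.pyGetD (chunkA cs q i) r ' '] else acc)
    (g := fun acc _ => acc)
    (l := PySem.List.pyRange 0 ((cs.length : Int)) q) (init := ([] : List Char))
    (by
      intro acc i _
      have : ¬ r < ((chunkA cs q i).length : Int) := by
        rw [chunkA_length]; omega
      simp [this])
  rw [h, PySem.List.foldl_ignore]

-- ===== VERDICT (by name: the statement is the Claim_ definition above) =====
theorem solution_spec : Claim_equal_solution := by
  intro q r code _hdom hpre
  obtain ⟨hq0, hr⟩ := hpre
  unfold Spec_solution solution solution_alt
  set cs := code.toList with hcs
  by_cases hq : 1 ≤ q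
  case neg =>
    -- q < 0: A builds no chunks (empty range); B returns "" either via q ≤ r or via an empty
    -- descending range (start r < 0 ≤ len)
    have hyA : yA q cs = [] := by
      unfold yA
      rw [pyRange_neg_nil 0 (cs.length : Int) (by omega) (by positivity)]
      rfl
    rw [hyA]
    by_cases hqr : q ≤ r
    · rw [if_pos hqr]; rfl
    · rw [if_neg hqr, pyRange_neg_nil r (cs.length : Int) (by omega) (by omega)]
      rfl
  have hr0 : 0 ≤ r := by omega
  -- second loop over indices of y becomes a fold over y itself
  rw [PySem.List.foldl_pyRange_zero_pyGetD' (yA q cs) ([] : List Char)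
        (fun a c => if r < ((c.length : Int)) then a ++ [PySem.List.pyGetD c r ' '] else a) []]
  rw [yA_eq_map, List.foldl_map]
  by_cases hrq : r < q
  · rw [if_neg (by omega)]
    have h := strided cs q r hq hr0 hrq ((cs.length : Int) - 0).toNat 0 [] (le_refl 0) (le_refl _)
    rw [h]
    simp
  · rw [if_pos (by omega)]
    rw [solution_big_r cs q r hq (by omega)]
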